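-- pv_equiv track=rewrite | github.com/waffle87/leetcode | calculate_money_bank.py | totalMoney
-- ===== SOURCE A (Python) =====
-- def totalMoney(n):
--     """
--     :type n: int
--     :rtype: int
--     """
--     week = 0
--     day = 1
--     balance = 0
--     for i in range(1, n + 1):
--         balance += week + day
--         day += 1
--         if i % 7 == 0:
--             week += 1
--             day = 1
--     return balance
-- ===== SOURCE B (Python) =====
-- def totalMoney(n):
--     m = max(n, 0)
--     w, r = divmod(m, 7)
--     return w * 28 + 7 * (w * (w - 1) // 2) + r * w + r * (r + 1) // 2
-- ===== Notes on version B (the rewrite author's own statement) =====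
-- stated objective: faster
-- what changed: Replaced the day-by-day loop with a closed-form formula: full-weeks arithmetic series plus partial-week triangular sum, computed with one divmod.
import Mathlib
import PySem

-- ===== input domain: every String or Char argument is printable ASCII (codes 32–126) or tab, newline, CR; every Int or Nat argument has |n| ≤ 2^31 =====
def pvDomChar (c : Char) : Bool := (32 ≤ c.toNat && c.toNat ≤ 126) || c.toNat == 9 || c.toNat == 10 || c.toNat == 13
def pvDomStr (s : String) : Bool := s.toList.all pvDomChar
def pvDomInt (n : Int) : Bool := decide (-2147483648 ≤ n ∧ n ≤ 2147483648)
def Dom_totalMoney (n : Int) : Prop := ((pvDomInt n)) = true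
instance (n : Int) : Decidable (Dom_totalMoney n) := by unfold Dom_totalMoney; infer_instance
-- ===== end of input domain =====

-- B replaces A's day-by-day loop with a closed-form (full weeks + partial week); a timing run decides the speed label.

-- ===== PORT A =====
def totalMoney (n : Int) : Int :=
  let s := (PySem.List.pyRange 1 (n + 1) 1).foldl
    (fun (st : Int × Int × Int) i =>
      let week := st.1
      let day := st.2.1
      let balance := st.2.2
      let balance := balance + week + day
      let day := day + 1
      if PySem.Int.mod i 7 = 0 then (week + 1, 1, balance) else (week, day, balance))
    (0, 1, 0)
  s.2.2

-- ===== PORT B =====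
def totalMoney_alt (n : Int) : Int :=
  let m := max n 0
  let w := PySem.Int.floordiv m 7
  let r := PySem.Int.mod m 7
  w * 28 + 7 * PySem.Int.floordiv (w * (w - 1)) 2 + r * w + PySem.Int.floordiv (r * (r + 1)) 2

-- ===== PRECONDITION & SPEC =====
def Spec_totalMoney (n : Int) (out : Int) : Prop := out = totalMoney_alt n
instance (n : Int) (out : Int) : Decidable (Spec_totalMoney n out) := by unfold Spec_totalMoney; infer_instance

-- ===== CLAIM (what is proved, stated in full; the proofs are below) =====
def Claim_equal_totalMoney : Prop := ∀ (n : Int), Dom_totalMoney n → Spec_totalMoney n (totalMoney n)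

-- ===== LEMMAS AND PROOFS =====

-- A's loop body, named so the invariant can talk about it
def pvStep (st : Int × Int × Int) (i : Int) : Int × Int × Int :=
  let week := st.1
  let day := st.2.1
  let balance := st.2.2
  let balance := balance + week + day
  let day := day + 1
  if PySem.Int.mod i 7 = 0 then (week + 1, 1, balance) else (week, day, balance)

-- B's closed form written with Lean's ediv/emod (equal to floordiv/mod for positive divisors)
def pvClosed (m : Int) : Int :=
  m / 7 * 28 + 7 * (m / 7 * (m / 7 - 1) / 2) + m % 7 * (m / 7) + m % 7 * (m % 7 + 1) / 2

lemma pvClosed_succ (m : Int) :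
    pvClosed (m + 1) = pvClosed m + m / 7 + (m % 7 + 1) := by
  unfold pvClosed
  by_cases h6 : m % 7 = 6
  · have hw : (m + 1) / 7 = m / 7 + 1 := by omega
    have hr : (m + 1) % 7 = 0 := by omega
    rw [hw, hr, h6]
    have e1 : (m / 7 + 1) * (m / 7 + 1 - 1) = m / 7 * (m / 7 - 1) + 2 * (m / 7) := by ring
    rw [e1]
    omega
  · have hw : (m + 1) / 7 = m / 7 := by omega
    have hr : (m + 1) % 7 = m % 7 + 1 := by omega
    rw [hw, hr]
    have e1 : (m % 7 + 1) * (m % 7 + 1 + 1) = m % 7 * (m % 7 + 1) + 2 * (m % 7 + 1) := by ring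
    have e2 : (m % 7 + 1) * (m / 7) = m % 7 * (m / 7) + m / 7 := by ring
    rw [e1, e2]
    omega

lemma pvInvariant (k : Nat) :
    (PySem.List.pyRange 1 ((k : Int) + 1) 1).foldl pvStep (0, 1, 0)
      = ((k : Int) / 7, (k : Int) % 7 + 1, pvClosed (k : Int)) := by
  induction k with
  | zero => simp [PySem.List.pyRange, pvClosed]
  | succ k ih =>
    have h : PySem.List.pyRange 1 ((k : Int) + 1 + 1) 1
        = PySem.List.pyRange 1 ((k : Int) + 1) 1 ++ [(k : Int) + 1] := by
      exact PySem.List.pyRange_one_succ_right (by omega)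
    push_cast
    rw [h, List.foldl_append, ih]
    simp only [List.foldl, pvStep, PySem.Int.mod,
      Int.fmod_eq_emod_of_nonneg _ (by omega : (0:Int) ≤ 7)]
    have hs := pvClosed_succ (k : Int)
    by_cases h7 : ((k : Int) + 1) % 7 = 0
    · rw [if_pos h7]
      refine Prod.ext ?_ (Prod.ext ?_ ?_) <;> simp <;> omega
    · rw [if_neg h7]
      refine Prod.ext ?_ (Prod.ext ?_ ?_) <;> simp <;> omega

lemma pvAlt_eq_closed (n : Int) (hn : 0 ≤ n) : totalMoney_alt n = pvClosed n := by
  simp only [totalMoney_alt, pvClosed, PySem.Int.floordiv, PySem.Int.mod, max_eq_left hn,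
    Int.fmod_eq_emod_of_nonneg _ (by omega : (0:Int) ≤ 7),
    Int.fdiv_eq_ediv_of_nonneg _ (by omega : (0:Int) ≤ 7),
    Int.fdiv_eq_ediv_of_nonneg _ (by omega : (0:Int) ≤ 2)]

-- ===== VERDICT (by name: the statement is the Claim_ definition above) =====
theorem totalMoney_spec : Claim_equal_totalMoney := by
  intro n _
  unfold Spec_totalMoney
  by_cases hn : 0 ≤ n
  · obtain ⟨k, rfl⟩ := Int.eq_ofNat_of_zero_le hn
    show ((PySem.List.pyRange 1 ((k : Int) + 1) 1).foldl pvStep (0, 1, 0)).2.2 = _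
    rw [pvInvariant, pvAlt_eq_closed _ (by positivity)]
  · have h1 : PySem.List.pyRange 1 (n + 1) 1 = [] := by
      rw [PySem.List.pyRange_one]
      simp only [List.map_eq_nil_iff, List.range_eq_nil]
      omega
    have h2 : max n 0 = 0 := by omega
    simp [totalMoney, totalMoney_alt, h1, h2, PySem.Int.floordiv, PySem.Int.mod]
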